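-- pv_equiv track=rewrite | github.com/Suldangoo/CodingTest | programmers/Level. 1/과일 장수.py | solution
-- ===== SOURCE A (Python) =====
-- def solution(k, m, score):
--     answer = 0 # 누적 이익값
--     score.sort(reverse = True) # 사과를 내림차순으로 정렬
--
--     n = m - 1 # 포인터
--     while n < len(score) :
--         answer += score[n] * m # 최저사과 점수 * 사과 개수 값을 이익에 누적
--         n += m # 포인터 증감
--
--     return answer
-- ===== SOURCE B (Python) =====
-- def solution(k, m, score):
--     # Group equal scores with a counter instead of walking sorted positions:
--     # for each distinct value v (descending) with cumulative count going from
--     # c to c2, the number of boxes whose minimum equals v is c2//m - c//m.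
--     counts = {}
--     for v in score:
--         counts[v] = counts.get(v, 0) + 1
--     total = 0
--     c = 0
--     for v in sorted(counts, reverse=True):
--         c2 = c + counts[v]
--         total += v * (c2 // m - c // m)
--         c = c2
--     return total * m
-- ===== Notes on version B (the rewrite author's own statement) =====
-- stated objective: alternative
-- what changed: B never materializes or indexes a sorted copy of score: it builds a value->count dictionary, sorts only the distinct values descending, and for each value adds v*(c2//m - c//m) boxes via cumulative counts, where A sorts the whole list descending and strides a while-loop pointer over positions m-1, 2m-1, ...
import Mathlib
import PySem

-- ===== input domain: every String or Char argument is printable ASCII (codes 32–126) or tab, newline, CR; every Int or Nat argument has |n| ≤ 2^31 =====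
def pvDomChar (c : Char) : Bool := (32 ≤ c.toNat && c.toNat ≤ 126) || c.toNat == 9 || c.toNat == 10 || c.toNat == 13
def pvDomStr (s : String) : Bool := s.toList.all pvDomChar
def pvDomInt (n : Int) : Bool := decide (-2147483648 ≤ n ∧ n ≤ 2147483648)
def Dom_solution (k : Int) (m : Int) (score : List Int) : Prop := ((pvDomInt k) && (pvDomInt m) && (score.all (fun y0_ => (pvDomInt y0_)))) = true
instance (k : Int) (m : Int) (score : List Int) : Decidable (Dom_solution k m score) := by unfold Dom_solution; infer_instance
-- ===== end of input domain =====

-- B groups equal scores in a value→count dictionary and sorts only the distinct values,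
-- adding v * (c2//m - c//m) per value via cumulative counts, instead of A's full descending
-- sort with a while-loop pointer striding positions m-1, 2m-1, ….
-- NOTE: Python A sorts `score` in place (B does not); the equivalence is about the return value.

-- ===== PORT A =====
-- while n < len(score): answer += score[n]*m; n += m
-- (the '1 ≤ m' conjunct is only a termination guard; Pre_solution guarantees it)
def solutionLoop (score : List Int) (m : Int) (n : Int) (answer : Int) : Int :=
  if _h : n < (score.length : Int) ∧ 1 ≤ m then
    solutionLoop score m (n + m) (answer + (PySem.List.pyGetD score n 0) * m)
  else answer
termination_by ((score.length : Int) - n).toNat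
decreasing_by omega

def solution (k : Int) (m : Int) (score : List Int) : Int :=
  let sc := PySem.List.sorted score (fun x => x) true
  solutionLoop sc m (m - 1) 0

-- ===== PORT B =====
def solution_alt (k : Int) (m : Int) (score : List Int) : Int :=
  let counts : PySem.Dict Int Int :=
    score.foldl (fun d v => d.insert v (d.getD v 0 + 1)) PySem.Dict.empty
  let fin := (PySem.List.sorted counts.keys (fun x => x) true).foldl
    (fun (p : Int × Int) v =>
      let c2 := p.1 + counts.getD v 0
      (c2, p.2 + v * (PySem.Int.floordiv c2 m - PySem.Int.floordiv p.1 m)))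
    (0, 0)
  fin.2 * m

-- ===== PRECONDITION & SPEC =====
-- A returns only for m ≥ 1: for every m ≤ 0 its loop either hits an out-of-range
-- (after negative wraparound) index — IndexError, even on an empty list, since
-- n = m-1 < 0 = len(score) enters the loop — or, for m = 0 on a nonempty list,
-- never advances n and loops forever. So Pre_ excludes no input on which A returns.
def Pre_solution (k : Int) (m : Int) (score : List Int) : Prop := 1 ≤ m
instance (k : Int) (m : Int) (score : List Int) : Decidable (Pre_solution k m score) := by unfold Pre_solution; infer_instance

def pvWitness_solution : Int × Int × List Int := (4, 3, [1, 2, 3, 1, 2, 3, 1])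

def Spec_solution (k : Int) (m : Int) (score : List Int) (out : Int) : Prop := out = solution_alt k m score
instance (k : Int) (m : Int) (score : List Int) (out : Int) : Decidable (Spec_solution k m score out) := by unfold Spec_solution; infer_instance

-- ===== CLAIM (what is proved, stated in full; the proofs are below) =====
def Claim_equal_solution : Prop := ∀ (k : Int) (m : Int) (score : List Int), Dom_solution k m score → Pre_solution k m score → Spec_solution k m score (solution k m score)

-- ===== LEMMAS AND PROOFS =====

-- ∑ over positions p of xs (at absolute offset C) with (C+p) % m = m-1 of xs[p] —
-- the common meeting point of the two programs.
def strideSum (m : Int) : List Int → Int → Int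
  | [], _ => 0
  | x :: xs, C => (if C % m = m - 1 then x else 0) + strideSum m xs (C + 1)

lemma strideSum_nil (m C : Int) : strideSum m [] C = 0 := rfl

lemma strideSum_cons (m x C : Int) (xs : List Int) :
    strideSum m (x :: xs) C = (if C % m = m - 1 then x else 0) + strideSum m xs (C + 1) := rfl

lemma strideSum_append (m : Int) (xs ys : List Int) : ∀ C : Int,
    strideSum m (xs ++ ys) C = strideSum m xs C + strideSum m ys (C + xs.length) := by
  induction xs with
  | nil => intro C; simp [strideSum_nil]
  | cons x xs ih =>
    intro C
    simp only [List.cons_append, strideSum_cons, ih (C + 1), List.length_cons]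
    push_cast
    rw [show C + 1 + (xs.length : Int) = C + ((xs.length : Int) + 1) from by ring]
    ring

lemma ediv_succ (m C : Int) (hm : 1 ≤ m) :
    (C + 1) / m = C / m + (if C % m = m - 1 then 1 else 0) := by
  have h0 : C % m + 1 + C / m * m = C + 1 := by
    have := Int.emod_add_ediv' C m; linarith
  have h1 : (C + 1) / m = (C % m + 1) / m + C / m := by
    rw [← h0, Int.add_mul_ediv_right _ _ (show m ≠ 0 by omega)]
  have hr0 : 0 ≤ C % m := Int.emod_nonneg C (by omega)
  have hrm : C % m < m := Int.emod_lt_of_pos C (by omega)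
  by_cases h : C % m = m - 1
  · rw [if_pos h, h1, h, sub_add_cancel, Int.ediv_self (show m ≠ 0 by omega)]; ring
  · rw [if_neg h, h1, Int.ediv_eq_zero_of_lt (by omega) (by omega)]; ring

lemma strideSum_replicate (m v : Int) (hm : 1 ≤ m) : ∀ (c : Nat) (C : Int),
    strideSum m (List.replicate c v) C = v * ((C + c) / m - C / m) := by
  intro c
  induction c with
  | zero => intro C; simp [strideSum_nil]
  | succ c ih =>
    intro C
    rw [List.replicate_succ, strideSum_cons, ih (C + 1), ediv_succ m C hm]
    have e : C + 1 + (c : Int) = C + ((c : Nat) + 1 : Nat) := by push_cast; ring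
    rw [e]
    split_ifs <;> ring

-- skipping k positions none of which hits the stride residue
lemma strideSum_skip (m : Int) : ∀ (k : Nat) (xs : List Int) (C : Int),
    (∀ j : Nat, j < k → (C + j) % m ≠ m - 1) →
    strideSum m xs C = strideSum m (xs.drop k) (C + k) := by
  intro k
  induction k with
  | zero => intro xs C _; simp
  | succ k ih =>
    intro xs C h
    cases xs with
    | nil => simp [strideSum_nil]
    | cons x xs =>
      have h0 : C % m ≠ m - 1 := by
        have := h 0 (by omega)
        simpa using this
      rw [strideSum_cons, if_neg h0, zero_add,
        ih xs (C + 1) (fun j hj => by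
          have := h (j + 1) (by omega)
          have e : C + ((j : Nat) + 1 : Nat) = C + 1 + (j : Int) := by push_cast; ring
          rwa [e] at this)]
      simp only [List.drop_succ_cons]
      congr 1
      push_cast
      ring

-- A's loop computes acc + m * strideSum of the tail
lemma loop_eq (d : List Int) (m : Int) (hm : 1 ≤ m) :
    ∀ (N : Nat) (n acc : Int), 0 ≤ n → n % m = m - 1 → ((d.length : Int) - n).toNat ≤ N →
      solutionLoop d m n acc = acc + m * strideSum m (d.drop n.toNat) n := by
  intro N
  induction N with
  | zero =>
    intro n acc h0 _ hN
    rw [solutionLoop, dif_neg (by omega), List.drop_eq_nil_of_le (by omega), strideSum_nil]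
    ring
  | succ N ih =>
    intro n acc h0 hres hN
    rw [solutionLoop]
    by_cases hlt : n < (d.length : Int)
    · rw [dif_pos ⟨hlt, hm⟩]
      have hnd : n.toNat < d.length := by omega
      have hdvd : n + 1 = n / m * m + m := by
        have h := Int.emod_add_ediv' n m
        rw [hres] at h; linarith
      have hres' : (n + m) % m = m - 1 := by
        have : n + m = n + m * 1 := by ring
        rw [this, Int.add_mul_emod_self_left, hres]
      rw [ih (n + m) (acc + PySem.List.pyGetD d n 0 * m) (by omega) hres'
        (by omega)]
      have hdrop : d.drop n.toNat = d[n.toNat] :: d.drop (n.toNat + 1) :=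
        List.drop_eq_getElem_cons hnd
      have hget : PySem.List.pyGetD d n 0 = d[n.toNat] := by
        rw [PySem.List.pyGetD_eq_getElem d 0 h0 (by omega)]
      have hskip : strideSum m (d.drop (n.toNat + 1)) (n + 1)
          = strideSum m (d.drop (n + m).toNat) (n + m) := by
        rw [strideSum_skip m (m - 1).toNat (d.drop (n.toNat + 1)) (n + 1)
          (fun j hj => by
            have hjm : (j : Int) < m - 1 := by omega
            have e2 : m * (n / m + 1) = n / m * m + m := by ring
            have e : n + 1 + (j : Int) = (j : Int) + m * (n / m + 1) := by omega
            rw [e, Int.add_mul_emod_self_left, Int.emod_eq_of_lt (by omega) (by omega)]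
            omega)]
        rw [List.drop_drop,
          show n.toNat + 1 + (m - 1).toNat = (n + m).toNat from by omega,
          show n + 1 + ((m - 1).toNat : Int) = n + m from by omega]
      rw [hdrop, strideSum_cons, if_pos hres, hget, hskip]
      ring
    · rw [dif_neg (by omega), List.drop_eq_nil_of_le (by omega), strideSum_nil]
      ring

-- the grouped list: one replicate block per distinct value
lemma count_groups (f : Int → Nat) : ∀ (keys : List Int), keys.Nodup → ∀ x : Int,
    (keys.flatMap (fun v => List.replicate (f v) v)).count x
      = if x ∈ keys then f x else 0 := by
  intro keys
  induction keys with
  | nil => intro _ x; simp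
  | cons v ks ih =>
    intro hnd x
    rw [List.nodup_cons] at hnd
    rw [List.flatMap_cons, List.count_append, ih hnd.2 x, List.count_replicate]
    by_cases hxv : x = v
    · subst hxv
      simp [hnd.1]
    · simp [List.mem_cons, hxv, show v ≠ x from fun h => hxv h.symm]

lemma groups_pairwise (f : Int → Nat) : ∀ (keys : List Int),
    keys.Pairwise (fun a b => b < a) →
    (keys.flatMap (fun v => List.replicate (f v) v)).Pairwise (fun a b : Int => b ≤ a) := by
  intro keys
  induction keys with
  | nil => intro _; simp
  | cons v ks ih =>
    intro hp
    rw [List.pairwise_cons] at hp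
    rw [List.flatMap_cons, List.pairwise_append]
    refine ⟨List.pairwise_replicate.2 (Or.inr le_rfl), ih hp.2, ?_⟩
    intro x hx y hy
    rw [List.eq_of_mem_replicate hx]
    rw [List.mem_flatMap] at hy
    obtain ⟨u, hu, hyu⟩ := hy
    rw [List.eq_of_mem_replicate hyu]
    exact le_of_lt (hp.1 u hu)

-- B's fold accumulates strideSum of the grouped list
lemma fold_groups (m : Int) (hm : 1 ≤ m) (f : Int → Nat) :
    ∀ (keys : List Int) (c t : Int), 0 ≤ c →
    (keys.foldl (fun (p : Int × Int) v =>
        (p.1 + (f v : Int), p.2 + v * ((p.1 + (f v : Int)) / m - p.1 / m))) (c, t)).2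
      = t + strideSum m (keys.flatMap (fun v => List.replicate (f v) v)) c := by
  intro keys
  induction keys with
  | nil => intro c t _; simp [strideSum_nil]
  | cons v ks ih =>
    intro c t hc
    rw [List.foldl_cons, ih (c + (f v : Int)) _ (by positivity),
      List.flatMap_cons, strideSum_append, strideSum_replicate m v hm,
      List.length_replicate]
    ring

-- ===== VERDICT (by name: the statement is the Claim_ definition above) =====
theorem solution_spec : Claim_equal_solution := by
  intro k m score _ hm
  have hm' : (1 : Int) ≤ m := hm
  have hcnt : (score.foldl (fun (d : PySem.Dict Int Int) v => d.insert v (d.getD v 0 + 1))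
      PySem.Dict.empty) = PySem.Dict.counter score :=
    PySem.Dict.foldl_insert_getD_add_one_eq_counter score
  unfold Spec_solution solution solution_alt
  simp only [hcnt]
  set d := PySem.List.sorted score (fun x => x) true with hd
  set keys := PySem.List.sorted (PySem.Dict.counter score).keys (fun x => x) true with hkeys
  set G := keys.flatMap (fun v => List.replicate (score.count v) v) with hG
  -- keys: distinct values of score, strictly descending
  have hSk : (PySem.Dict.counter score).keys = PySem.Set.ofList score :=
    PySem.Dict.keys_counter score
  have hkperm : keys.Perm (PySem.Set.ofList score) := by
    rw [hkeys, hSk]; exact PySem.List.sorted_perm _ _ _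
  have hknd : keys.Nodup := hkperm.nodup_iff.2 (PySem.Set.nodup_ofList score)
  have hkdesc : keys.Pairwise (fun a b => b < a) := by
    have h1 : keys.Pairwise (fun a b : Int => b ≤ a) := by
      rw [hkeys]; exact PySem.List.sorted_pairwise_rev _ _
    exact (h1.and hknd).imp (fun h => lt_of_le_of_ne h.1 (fun e => h.2 e.symm))
  -- G is a permutation of score
  have hGperm : G.Perm score := by
    rw [List.perm_iff_count]
    intro x
    rw [hG, count_groups (fun v => score.count v) keys hknd x]
    by_cases hx : x ∈ score
    · rw [if_pos (by rw [hkeys, PySem.List.mem_sorted, hSk, PySem.Set.mem_ofList]; exact hx)]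
    · rw [if_neg (by rw [hkeys, PySem.List.mem_sorted, hSk, PySem.Set.mem_ofList]; exact hx),
        List.count_eq_zero.2 hx]
  -- d (the descending sort) IS the grouped list G
  have hGpw : G.Pairwise (fun a b : Int => b ≤ a) :=
    groups_pairwise (fun v => score.count v) keys hkdesc
  have hdG : d = G := by
    have h1 : List.Pairwise (fun a b : Int => a ≤ b) G.reverse := by
      rw [List.pairwise_reverse]; exact hGpw
    have h2 : G.reverse.Perm score := (List.reverse_perm G).trans hGperm
    have h3 : PySem.List.sorted score (fun x => x) false = G.reverse :=
      PySem.List.sorted_id_eq_of_perm_of_pairwise score G.reverse h2 h1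
    have h4 : List.Pairwise (fun a b : Int => a ≤ b) d.reverse := by
      rw [List.pairwise_reverse, hd]
      exact PySem.List.sorted_pairwise_rev _ _
    have h5 : d.reverse.Perm score := (List.reverse_perm d).trans (PySem.List.sorted_perm score _ _)
    have h6 : PySem.List.sorted score (fun x => x) false = d.reverse :=
      PySem.List.sorted_id_eq_of_perm_of_pairwise score d.reverse h5 h4
    have := h6.symm.trans h3
    simpa using congrArg List.reverse this
  -- A's side: loop = m * strideSum m d 0
  have hres : (m - 1) % m = m - 1 := Int.emod_eq_of_lt (by omega) (by omega)
  have hA : solutionLoop d m (m - 1) 0 = m * strideSum m d 0 := by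
    rw [loop_eq d m hm' ((d.length : Int) - (m - 1)).toNat (m - 1) 0 (by omega) hres le_rfl]
    rw [strideSum_skip m (m - 1).toNat d 0
      (fun j hj => by
        rw [zero_add, Int.emod_eq_of_lt (by omega) (by omega)]
        omega)]
    have e : (0 : Int) + ((m - 1).toNat : Int) = m - 1 := by omega
    rw [e]
    ring
  -- B's side: the fold function, with the counter looked up and // unfolded
  have hfun : (fun (p : Int × Int) v =>
      (p.1 + (PySem.Dict.counter score).getD v 0,
       p.2 + v * (PySem.Int.floordiv (p.1 + (PySem.Dict.counter score).getD v 0) m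
         - PySem.Int.floordiv p.1 m)))
      = (fun (p : Int × Int) v =>
      (p.1 + (score.count v : Int),
       p.2 + v * ((p.1 + (score.count v : Int)) / m - p.1 / m))) := by
    funext p v
    rw [PySem.Dict.getD_counter]
    rw [PySem.Int.floordiv_eq_ediv_of_pos (by omega : (0:Int) < m),
      PySem.Int.floordiv_eq_ediv_of_pos (by omega : (0:Int) < m)]
  rw [hA]
  show m * strideSum m d 0
      = (keys.foldl (fun (p : Int × Int) v =>
          (p.1 + (PySem.Dict.counter score).getD v 0,
           p.2 + v * (PySem.Int.floordiv (p.1 + (PySem.Dict.counter score).getD v 0) m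
             - PySem.Int.floordiv p.1 m))) (0, 0)).2 * m
  rw [hfun, fold_groups m hm' (fun v => score.count v) keys 0 0 le_rfl, ← hG, hdG]
  ring
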